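-- pv_equiv track=rewrite | github.com/mnghiap/oa-practice | execute_processes.py | total_execution_time
-- ===== SOURCE A (Python) =====
-- import math
--
-- def total_execution_time(execution):
--     total_time = 0
--     time_to_proc = dict()
--     proc_to_group = dict()
--     for i, time in enumerate(execution):
--         if time not in time_to_proc:
--             time_to_proc[time] = set([i])
--         else:
--             time_to_proc[time].add(i)
--     for groups in time_to_proc.values():
--         for proc in groups:
--             proc_to_group[proc] = groups
--     for i, time in enumerate(execution):
--         total_time += time
--         for proc in proc_to_group[i]:
--             if execution[proc] == time:
--                 execution[proc] = math.ceil(execution[proc] / 2)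
--     return total_time
-- ===== SOURCE B (Python) =====
-- def total_execution_time(execution):
--     counts = {}
--     for t in execution:
--         counts[t] = counts.get(t, 0) + 1
--     total = 0
--     for v, k in counts.items():
--         x = v
--         while k > 0:
--             nxt = -((-x) // 2)  # == math.ceil(x / 2), exact for ints
--             if nxt == x:
--                 total += x * k
--                 k = 0
--             else:
--                 total += x
--                 x = nxt
--                 k -= 1
--     return total
-- ===== Notes on version B (the rewrite author's own statement) =====
-- stated objective: faster
-- what changed: A builds index groups per value and re-halves every group member on each visit (quadratic in group sizes, and it mutates the input list); B counts multiplicities in one pass and, per distinct value, sums the first k terms of its ceil-halving sequence, stopping early at the sequence's fixed point.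
import Mathlib
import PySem

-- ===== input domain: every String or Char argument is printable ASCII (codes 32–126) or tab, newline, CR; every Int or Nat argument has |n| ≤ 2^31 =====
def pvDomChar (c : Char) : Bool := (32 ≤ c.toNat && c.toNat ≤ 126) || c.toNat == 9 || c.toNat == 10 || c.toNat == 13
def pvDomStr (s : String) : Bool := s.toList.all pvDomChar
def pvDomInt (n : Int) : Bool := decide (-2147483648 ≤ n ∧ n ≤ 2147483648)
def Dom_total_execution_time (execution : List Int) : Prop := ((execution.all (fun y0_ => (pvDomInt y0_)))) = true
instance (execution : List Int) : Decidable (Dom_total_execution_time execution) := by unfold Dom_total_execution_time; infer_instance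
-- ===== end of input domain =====

-- B replaces A's per-index group halving (quadratic in group sizes) by counting multiplicities once and
-- summing the first-k terms of each distinct value's halving sequence (objective: faster).
-- A mutates its argument list in place (halving entries); the equivalence proved here is about the RETURN value only (B does not mutate).

-- ===== PORT A =====
-- math.ceil(x / 2) for an int x: Python's float halving is exact for |x| ≤ 2^31, so this equals ⌈x/2⌉ = -((-x)//2).
def pvCeilHalf (x : Int) : Int := -(PySem.Int.floordiv (-x) 2)

-- Third Python loop 'for i, time in enumerate(execution)' reads execution[i] AFTER earlier iterations mutated
-- the list, so it is ported as a fold over the indices reading the current list state.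
-- 'proc_to_group[i]' always succeeds in A (every index is in some group), so getD's default is unreachable.
def total_execution_time (execution : List Int) : Int :=
  let time_to_proc : PySem.Dict Int (PySem.Set Int) :=
    (PySem.List.enumerate execution).foldl
      (fun d p =>
        match d.get? p.2 with
        | none => d.insert p.2 (PySem.Set.ofList [p.1])
        | some s => d.insert p.2 (PySem.Set.add s p.1))
      PySem.Dict.empty
  let proc_to_group : PySem.Dict Int (PySem.Set Int) :=
    (PySem.Dict.values time_to_proc).foldl
      (fun d groups => groups.foldl (fun d proc => d.insert proc groups) d)
      PySem.Dict.empty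
  let final := (List.range execution.length).foldl
    (fun st (i : Nat) =>
      let time := PySem.List.pyGetD st.2 (i : Int) 0
      let ex := (PySem.Dict.getD proc_to_group (i : Int) PySem.Set.empty).foldl
        (fun e proc =>
          if PySem.List.pyGetD e proc 0 = time
          then PySem.List.pySetD e proc (pvCeilHalf (PySem.List.pyGetD e proc 0))
          else e)
        st.2
      (st.1 + time, ex))
    ((0 : Int), execution)
  final.1

-- ===== PORT B =====
-- Source B's 'while k > 0' loop; the fuel is k itself (a multiplicity, hence a nonnegative count).
def pvWhile (total x : Int) : Nat → Int
  | 0 => total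
  | Nat.succ k' =>
    let nxt := pvCeilHalf x
    if nxt = x then total + x * ((k' : Int) + 1)
    else pvWhile (total + x) nxt k'

def total_execution_time_alt (execution : List Int) : Int :=
  let counts : PySem.Dict Int Int :=
    execution.foldl (fun d t => d.insert t (d.getD t 0 + 1)) PySem.Dict.empty
  counts.items.foldl (fun total p => pvWhile total p.1 p.2.toNat) 0

-- ===== PRECONDITION & SPEC =====
def Spec_total_execution_time (execution : List Int) (out : Int) : Prop := out = total_execution_time_alt execution
instance (execution : List Int) (out : Int) : Decidable (Spec_total_execution_time execution out) := by unfold Spec_total_execution_time; infer_instance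

-- ===== CLAIM (what is proved, stated in full; the proofs are below) =====
def Claim_equal_total_execution_time : Prop := ∀ (execution : List Int), Dom_total_execution_time execution → Spec_total_execution_time execution (total_execution_time execution)

-- ===== LEMMAS AND PROOFS =====

-- sum of the first k terms of the halving sequence starting at v
def pvS (v : Int) : Nat → Int
  | 0 => 0
  | Nat.succ k => v + pvS (pvCeilHalf v) k

-- the indices (as Ints, ascending) at which xs holds value v — A's group of value v
def pvGs (xs : List Int) (v : Int) : List Int :=
  ((List.range xs.length).filter (fun j => xs.getD j 0 == v)).map (fun j => ((j : Nat) : Int))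

-- A's running total after the first m iterations of the third loop
def pvAsum (xs : List Int) : Nat → Int
  | 0 => 0
  | Nat.succ m => pvAsum xs m + pvCeilHalf^[(xs.take m).count (xs.getD m 0)] (xs.getD m 0)

-- ---- B-side lemmas ----
lemma pvS_fix (x : Int) (h : pvCeilHalf x = x) : ∀ k, pvS x k = x * k := by
  intro k
  induction k with
  | zero => simp [pvS]
  | succ k ih => rw [pvS, h, ih]; push_cast; ring

lemma pvWhile_eq (k : Nat) : ∀ (total x : Int), pvWhile total x k = total + pvS x k := by
  induction k with
  | zero => intro total x; simp [pvWhile, pvS]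
  | succ k ih =>
    intro total x
    rw [pvWhile, pvS]
    by_cases h : pvCeilHalf x = x
    · simp only [h, if_true]
      rw [pvS_fix x h k]
      ring
    · simp only [if_neg h]
      rw [ih]
      ring

lemma pvS_snoc (k : Nat) : ∀ v : Int, pvS v (k+1) = pvS v k + pvCeilHalf^[k] v := by
  induction k with
  | zero => intro v; simp [pvS]
  | succ k ih =>
    intro v
    rw [pvS, ih (pvCeilHalf v), pvS, Function.iterate_succ_apply]
    ring

lemma setOfList_toFinset (xs : List Int) : (PySem.Set.ofList xs).toFinset = xs.toFinset := by
  ext v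
  simp [List.mem_toFinset, PySem.Set.mem_ofList]

lemma foldl_pvWhile_eq (l : List (Int × Int)) : ∀ total : Int,
    l.foldl (fun total p => pvWhile total p.1 p.2.toNat) total
      = total + (l.map (fun p => pvS p.1 p.2.toNat)).sum := by
  induction l with
  | nil => intro total; simp
  | cons p t ih =>
    intro total
    rw [List.foldl_cons, ih, pvWhile_eq, List.map_cons, List.sum_cons]
    ring

lemma B_eq (xs : List Int) :
    total_execution_time_alt xs = ∑ v ∈ xs.toFinset, pvS v (xs.count v) := by
  unfold total_execution_time_alt
  simp only [PySem.Dict.foldl_insert_getD_add_one_eq_counter]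
  rw [PySem.Dict.items_counter, foldl_pvWhile_eq, List.map_map]
  rw [← setOfList_toFinset, List.sum_toFinset _ (PySem.Set.nodup_ofList xs)]
  simp [Function.comp_def]

-- ---- regrouping: prefix sums of per-visit terms = per-value halving sums ----
lemma finset_snoc (pre : List Int) (a : Int) :
    ∑ v ∈ (pre ++ [a]).toFinset, pvS v ((pre ++ [a]).count v)
      = (∑ v ∈ pre.toFinset, pvS v (pre.count v)) + pvCeilHalf^[pre.count a] a := by
  have hcnt : ∀ v : Int, (pre ++ [a]).count v = pre.count v + if a = v then 1 else 0 := by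
    intro v
    rw [List.count_append]
    by_cases h : a = v <;> simp [h]
  by_cases ha : a ∈ pre.toFinset
  · have hset : (pre ++ [a]).toFinset = pre.toFinset := by
      simp [List.toFinset_append, Finset.insert_eq_self.mpr ha]
    rw [hset,
        ← Finset.add_sum_erase _ (fun v => pvS v ((pre ++ [a]).count v)) ha,
        ← Finset.add_sum_erase _ (fun v => pvS v (pre.count v)) ha]
    have hoff : ∑ v ∈ pre.toFinset.erase a, pvS v ((pre ++ [a]).count v)
        = ∑ v ∈ pre.toFinset.erase a, pvS v (pre.count v) := by
      refine Finset.sum_congr rfl ?_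
      intro v hv
      have hva : a ≠ v := fun h => (Finset.mem_erase.mp hv).1 h.symm
      rw [hcnt v, if_neg hva, Nat.add_zero]
    rw [hoff, hcnt a, if_pos rfl, pvS_snoc]
    ring
  · have hset : (pre ++ [a]).toFinset = insert a pre.toFinset := by
      simp [List.toFinset_append]
    have hca : pre.count a = 0 := by
      rw [List.count_eq_zero]
      intro h; exact ha (List.mem_toFinset.mpr h)
    rw [hset, Finset.sum_insert ha]
    have hoff : ∑ v ∈ pre.toFinset, pvS v ((pre ++ [a]).count v)
        = ∑ v ∈ pre.toFinset, pvS v (pre.count v) := by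
      refine Finset.sum_congr rfl ?_
      intro v hv
      have hva : a ≠ v := fun h => ha (h ▸ hv)
      rw [hcnt v, if_neg hva, Nat.add_zero]
    rw [hoff, hcnt a, if_pos rfl, hca, pvS_snoc]
    simp [pvS]
    ring

lemma pvAsum_eq (xs : List Int) : ∀ m, m ≤ xs.length →
    pvAsum xs m = ∑ v ∈ (xs.take m).toFinset, pvS v ((xs.take m).count v) := by
  intro m
  induction m with
  | zero => intro _; simp [pvAsum]
  | succ m ih =>
    intro hm
    have hm' : m < xs.length := by omega
    have htake : xs.take (m+1) = xs.take m ++ [xs[m]] :=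
      List.take_succ_eq_append_getElem hm'
    have hget : xs.getD m 0 = xs[m] := by
      rw [List.getD_eq_getElem?_getD, List.getElem?_eq_getElem hm']
      rfl
    rw [pvAsum, ih (by omega), htake, finset_snoc, hget]

-- ---- A-side lemmas ----
lemma pvGs_not_mem (xs : List Int) (v : Int) (h : v ∉ xs) : pvGs xs v = [] := by
  unfold pvGs
  rw [List.filter_eq_nil_iff.mpr, List.map_nil]
  intro j hj
  simp only [List.mem_range] at hj
  simp only [beq_iff_eq]
  intro he
  have hg : xs.getD j 0 = xs[j] := by
    rw [List.getD_eq_getElem?_getD, List.getElem?_eq_getElem hj]; rfl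
  exact h (he ▸ hg ▸ List.getElem_mem hj)

lemma pvGs_append (xs : List Int) (a v : Int) :
    pvGs (xs ++ [a]) v = pvGs xs v ++ (if a = v then [((xs.length : Nat) : Int)] else []) := by
  unfold pvGs
  rw [List.length_append, List.length_singleton, List.range_succ, List.filter_append,
      List.filter_congr (q := fun j => xs.getD j 0 == v) ?_, List.map_append]
  · congr 1
    by_cases h : a = v
    · simp [List.filter, List.getD, h]
    · have hb : (a == v) = false := beq_eq_false_iff_ne.mpr h
      simp [List.filter, List.getD, hb, h]
  · intro j hj
    simp only [List.mem_range] at hj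
    rw [List.getD_append xs [a] 0 j hj]

lemma mem_pvGs (xs : List Int) (v : Int) (j : Nat) (hj : j < xs.length) :
    ((j : Int) ∈ pvGs xs v) ↔ xs.getD j 0 = v := by
  unfold pvGs
  simp only [List.mem_map, List.mem_filter, List.mem_range, beq_iff_eq, Nat.cast_inj]
  constructor
  · rintro ⟨j', ⟨_, hv⟩, hj'⟩
    exact hj' ▸ hv
  · intro h
    exact ⟨j, ⟨hj, h⟩, rfl⟩

lemma pvGs_lt (xs : List Int) (v q : Int) (hq : q ∈ pvGs xs v) :
    ∃ j : Nat, j < xs.length ∧ q = (j : Int) := by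
  unfold pvGs at hq
  simp only [List.mem_map, List.mem_filter, List.mem_range] at hq
  obtain ⟨j, ⟨hj, _⟩, rfl⟩ := hq
  exact ⟨j, hj, rfl⟩

lemma dict_get?_of_items (d : PySem.Dict Int (PySem.Set Int)) (xs : List Int)
    (hit : d.items = (PySem.Set.ofList xs).map (fun v => (v, pvGs xs v))) (a : Int) :
    d.get? a = if a ∈ xs then some (pvGs xs a) else none := by
  have hkeys : d.keys = PySem.Set.ofList xs := by
    simp only [PySem.Dict.keys, hit, List.map_map]
    exact (List.map_congr_left fun v _ => rfl).trans (List.map_id _)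
  have hnd : d.keys.Nodup := hkeys ▸ PySem.Set.nodup_ofList xs
  by_cases h : a ∈ xs
  · rw [if_pos h]
    refine PySem.Dict.get?_of_mem_items _ ?_ hnd
    rw [hit]
    exact List.mem_map.mpr ⟨a, (PySem.Set.mem_ofList _ _).mpr h, rfl⟩
  · rw [if_neg h]
    refine (PySem.Dict.get?_eq_none_iff_not_mem_keys _ _).mpr ?_
    rw [hkeys]
    exact fun hm => h ((PySem.Set.mem_ofList _ _).mp hm)

lemma len_not_mem_pvGs (xs : List Int) (a : Int) :
    ((xs.length : Nat) : Int) ∉ pvGs xs a := by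
  intro hm
  obtain ⟨j, hj, hje⟩ := pvGs_lt xs a _ hm
  exact absurd (Nat.cast_inj.mp hje) (by omega)

lemma ttp_items (xs : List Int) :
    ((PySem.List.enumerate xs).foldl
      (fun d p =>
        match d.get? p.2 with
        | none => d.insert p.2 (PySem.Set.ofList [p.1])
        | some s => d.insert p.2 (PySem.Set.add s p.1))
      PySem.Dict.empty).items
      = (PySem.Set.ofList xs).map (fun v => (v, pvGs xs v)) := by
  induction xs using List.reverseRecOn with
  | nil => rfl
  | append_singleton xs a ih =>
    rw [PySem.List.enumerate_append, List.foldl_append]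
    set D := (PySem.List.enumerate xs).foldl
      (fun d p =>
        match d.get? p.2 with
        | none => d.insert p.2 (PySem.Set.ofList [p.1])
        | some s => d.insert p.2 (PySem.Set.add s p.1))
      PySem.Dict.empty with hDdef
    have hget := dict_get?_of_items D xs ih a
    have hL : (0 : Int) + (xs.length : Int) = ((xs.length : Nat) : Int) := by simp
    rw [PySem.List.enumerate_cons, PySem.List.enumerate_nil, hL]
    by_cases h : a ∈ xs
    · rw [if_pos h] at hget
      have hcont : D.contains a = true := by
        rw [PySem.Dict.contains_eq_isSome_get?, hget]; rfl
      simp only [List.foldl_cons, List.foldl_nil, hget]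
      rw [PySem.Dict.items_insert_of_contains _ _ hcont, ih,
          PySem.Set.add_of_not_mem (len_not_mem_pvGs xs a),
          PySem.Set.ofList_append_singleton,
          PySem.Set.add_of_mem ((PySem.Set.mem_ofList _ _).mpr h), List.map_map]
      refine List.map_congr_left ?_
      intro v hv
      simp only [Function.comp]
      rw [pvGs_append]
      by_cases hva : v = a
      · subst hva
        simp
      · have hb : (v == a) = false := beq_eq_false_iff_ne.mpr hva
        have hav : ¬ a = v := fun he => hva he.symm
        simp [hb, hav]
    · rw [if_neg h] at hget
      have hcont : D.contains a = false := by
        rw [PySem.Dict.contains_eq_isSome_get?, hget]; rfl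
      simp only [List.foldl_cons, List.foldl_nil, hget]
      rw [PySem.Dict.items_insert_of_not_contains _ _ hcont, ih,
          PySem.Set.ofList_append_singleton,
          PySem.Set.add_of_not_mem (fun hm => h ((PySem.Set.mem_ofList _ _).mp hm)),
          List.map_append]
      congr 1
      · refine List.map_congr_left ?_
        intro v hv
        have hva : v ≠ a := fun he => h (he ▸ (PySem.Set.mem_ofList _ _).mp hv)
        rw [pvGs_append, if_neg (fun he => hva he.symm), List.append_nil]
      · rw [List.map_singleton, pvGs_append, if_pos rfl, pvGs_not_mem xs a h,
            List.nil_append]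
        rfl

lemma ptg_inner_gen (g : PySem.Set Int) : ∀ (l : List Int) (d : PySem.Dict Int (PySem.Set Int)) (q : Int),
    (l.foldl (fun d proc => d.insert proc g) d).get? q = if q ∈ l then some g else d.get? q := by
  intro l
  induction l with
  | nil => intro d q; simp
  | cons x t ih =>
    intro d q
    rw [List.foldl_cons, ih]
    by_cases hqt : q ∈ t
    · rw [if_pos hqt, if_pos (List.mem_cons.mpr (Or.inr hqt))]
    · rw [if_neg hqt]
      by_cases hqx : q = x
      · subst hqx
        rw [PySem.Dict.get?_insert_self, if_pos (List.mem_cons_self)]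
      · rw [PySem.Dict.get?_insert_of_ne _ _ hqx,
            if_neg (fun hm => (List.mem_cons.mp hm).elim hqx hqt)]

lemma ptg_inner (g : List Int) : ∀ (d : PySem.Dict Int (PySem.Set Int)) (q : Int),
    (g.foldl (fun d proc => d.insert proc g) d).get? q = if q ∈ g then some g else d.get? q :=
  fun d q => ptg_inner_gen g g d q

lemma ptg_outer (xs : List Int) (vsl : List Int) :
    ∀ (d : PySem.Dict Int (PySem.Set Int)) (j : Nat), j < xs.length →
    ((vsl.map (pvGs xs)).foldl (fun d groups => groups.foldl (fun d proc => d.insert proc groups) d) d).get? (j : Int)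
      = if xs.getD j 0 ∈ vsl then some (pvGs xs (xs.getD j 0)) else d.get? (j : Int) := by
  induction vsl with
  | nil => intro d j _; simp
  | cons v tl ih =>
    intro d j hj
    rw [List.map_cons, List.foldl_cons, ih _ j hj, ptg_inner]
    simp only [mem_pvGs xs v j hj]
    by_cases htl : xs.getD j 0 ∈ tl
    · rw [if_pos htl, if_pos (List.mem_cons.mpr (Or.inr htl))]
    · rw [if_neg htl]
      by_cases hv : xs.getD j 0 = v
      · rw [if_pos hv, if_pos (List.mem_cons.mpr (Or.inl hv)), hv]
      · rw [if_neg hv, if_neg (fun hm => (List.mem_cons.mp hm).elim hv htl)]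

lemma inner_fold (t : Int) : ∀ (js : List Nat) (e : List Int), js.Nodup →
    (∀ j ∈ js, j < e.length) → (∀ j ∈ js, e.getD j 0 = t) →
    let r := js.foldl (fun e j => if e.getD j 0 = t then e.set j (pvCeilHalf (e.getD j 0)) else e) e
    r.length = e.length ∧ ∀ q : Nat, r.getD q 0 = if q ∈ js then pvCeilHalf t else e.getD q 0 := by
  intro js
  induction js with
  | nil => intro e _ _ _; exact ⟨rfl, fun q => by simp⟩
  | cons x tl ih =>
    intro e hnd hlen hval
    have hx : e.getD x 0 = t := hval x List.mem_cons_self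
    have hxl : x < e.length := hlen x List.mem_cons_self
    have hstep : (if e.getD x 0 = t then e.set x (pvCeilHalf (e.getD x 0)) else e)
        = e.set x (pvCeilHalf t) := by rw [if_pos hx, hx]
    have hset_len : (e.set x (pvCeilHalf t)).length = e.length := List.length_set
    have hgd : ∀ q : Nat, (e.set x (pvCeilHalf t)).getD q 0
        = if q = x then pvCeilHalf t else e.getD q 0 := by
      intro q
      by_cases hq : q = x
      · subst hq
        rw [if_pos rfl]
        simp [List.getD, hxl]
      · rw [if_neg hq]
        simp [List.getD, List.getElem?_set_ne (fun h => hq h.symm)]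
    have hnd' : tl.Nodup := (List.nodup_cons.mp hnd).2
    have hxm : x ∉ tl := (List.nodup_cons.mp hnd).1
    obtain ⟨ihlen, ihgd⟩ := ih (e.set x (pvCeilHalf t)) hnd'
      (fun j hj => hset_len ▸ hlen j (List.mem_cons.mpr (Or.inr hj)))
      (fun j hj => by
        have hjx : ¬ j = x := fun h => hxm (h ▸ hj)
        rw [hgd j, if_neg hjx]
        exact hval j (List.mem_cons.mpr (Or.inr hj)))
    refine ⟨?_, ?_⟩
    · rw [List.foldl_cons, hstep, ihlen, hset_len]
    · intro q
      rw [List.foldl_cons, hstep, ihgd q, hgd q]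
      by_cases hqt : q ∈ tl
      · rw [if_pos hqt, if_pos (List.mem_cons.mpr (Or.inr hqt))]
      · rw [if_neg hqt]
        by_cases hqx : q = x
        · rw [if_pos hqx, if_pos (List.mem_cons.mpr (Or.inl hqx))]
        · rw [if_neg hqx, if_neg (fun hm => (List.mem_cons.mp hm).elim hqx hqt)]

lemma getD_lt (l : List Int) (q : Nat) (h : q < l.length) : l.getD q 0 = l[q] := by
  rw [List.getD_eq_getElem?_getD, List.getElem?_eq_getElem h]; rfl

lemma map_getD_range (xs : List Int) :
    (List.range xs.length).map (fun j => xs.getD j 0) = xs := by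
  refine List.ext_getElem (by simp) ?_
  intro q h1 h2
  simp only [List.getElem_map, List.getElem_range]
  rw [getD_lt xs q h2]

lemma loopA (xs : List Int) (ptg : PySem.Dict Int (PySem.Set Int))
    (H : ∀ j : Nat, j < xs.length → ptg.get? ((j : Nat) : Int) = some (pvGs xs (xs.getD j 0))) :
    ∀ m : Nat, m ≤ xs.length →
    ((List.range m).foldl
      (fun st i =>
        let time := PySem.List.pyGetD st.2 ((i : Nat) : Int) 0
        let ex := (PySem.Dict.getD ptg ((i : Nat) : Int) PySem.Set.empty).foldl
          (fun e proc =>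
            if PySem.List.pyGetD e proc 0 = time
            then PySem.List.pySetD e proc (pvCeilHalf (PySem.List.pyGetD e proc 0))
            else e) st.2
        (st.1 + time, ex))
      ((0 : Int), xs))
      = (pvAsum xs m,
         (List.range xs.length).map
           (fun j => pvCeilHalf^[(xs.take m).count (xs.getD j 0)] (xs.getD j 0))) := by
  intro m
  induction m with
  | zero =>
    intro _
    simp only [List.range_zero, List.foldl_nil, List.take_zero, List.count_nil,
      Function.iterate_zero, id_eq, pvAsum]
    rw [map_getD_range]
  | succ m ih =>
    intro hm
    have hm' : m < xs.length := by omega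
    rw [List.range_succ, List.foldl_append, ih (by omega), List.foldl_cons, List.foldl_nil]
    set c := (xs.take m).count (xs.getD m 0) with hc
    set Em := (List.range xs.length).map
      (fun j => pvCeilHalf^[(xs.take m).count (xs.getD j 0)] (xs.getD j 0)) with hEm
    have hEmlen : Em.length = xs.length := by simp [hEm]
    have hEmgd : ∀ j : Nat, j < xs.length →
        Em.getD j 0 = pvCeilHalf^[(xs.take m).count (xs.getD j 0)] (xs.getD j 0) := by
      intro j hj
      rw [hEm, getD_lt _ j (by simp [hj])]
      simp
    have htime : PySem.List.pyGetD Em ((m : Nat) : Int) 0 = pvCeilHalf^[c] (xs.getD m 0) := by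
      rw [PySem.List.pyGetD_natCast]
      exact hEmgd m hm'
    have hgroup : PySem.Dict.getD ptg ((m : Nat) : Int) PySem.Set.empty = pvGs xs (xs.getD m 0) :=
      PySem.Dict.getD_of_get?_eq_some _ _ (H m hm')
    simp only [htime, hgroup]
    set t := pvCeilHalf^[c] (xs.getD m 0) with ht
    set js := (List.range xs.length).filter (fun j => xs.getD j 0 == xs.getD m 0) with hjs
    have hGsmap : pvGs xs (xs.getD m 0) = js.map (fun j => ((j : Nat) : Int)) := rfl
    have hmemjs : ∀ q : Nat, q ∈ js ↔ (q < xs.length ∧ xs.getD q 0 = xs.getD m 0) := by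
      intro q
      rw [hjs, List.mem_filter, List.mem_range, beq_iff_eq]
    obtain ⟨hrlen, hrgd⟩ := inner_fold t js Em
      (List.Nodup.filter _ (List.nodup_range))
      (fun j hj => by rw [hEmlen]; exact ((hmemjs j).mp hj).1)
      (fun j hj => by
        obtain ⟨hjl, hjv⟩ := (hmemjs j).mp hj
        rw [hEmgd j hjl, hjv, ht])
    have hfold : (pvGs xs (xs.getD m 0)).foldl
        (fun e proc =>
          if PySem.List.pyGetD e proc 0 = t
          then PySem.List.pySetD e proc (pvCeilHalf (PySem.List.pyGetD e proc 0))
          else e) Em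
        = js.foldl (fun e j => if e.getD j 0 = t then e.set j (pvCeilHalf (e.getD j 0)) else e) Em := by
      rw [hGsmap, List.foldl_map]
      simp only [PySem.List.pyGetD_natCast, PySem.List.pySetD_natCast]
    refine Prod.ext ?_ ?_
    · show pvAsum xs m + t = pvAsum xs (m + 1)
      rw [pvAsum, ht, hc]
    · show ((pvGs xs (xs.getD m 0)).foldl _ Em) = _
      rw [hfold]
      refine List.ext_getElem (by rw [hrlen, hEmlen]; simp) ?_
      intro q h1 h2
      have hq : q < xs.length := by simpa using h2
      have hcnt : (xs.take (m+1)).count (xs.getD q 0)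
          = (xs.take m).count (xs.getD q 0) + if xs.getD q 0 = xs.getD m 0 then 1 else 0 := by
        rw [List.take_succ_eq_append_getElem hm', List.count_append, ← getD_lt xs m hm',
            List.count_cons, List.count_nil]
        by_cases h : xs.getD q 0 = xs.getD m 0
        · rw [if_pos h, if_pos (beq_iff_eq.mpr h.symm)]
        · rw [if_neg h, if_neg (fun hb => h ((beq_iff_eq.mp hb).symm))]
      rw [← getD_lt _ q (by rw [hrlen, hEmlen]; exact hq), hrgd q]
      simp only [List.getElem_map, List.getElem_range]
      by_cases hv : xs.getD q 0 = xs.getD m 0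
      · rw [if_pos ((hmemjs q).mpr ⟨hq, hv⟩), hcnt, if_pos hv, hv]
        have : (xs.take m).count (xs.getD m 0) = c := hc.symm
        rw [this, Function.iterate_succ_apply', ht]
      · rw [if_neg (fun hm0 => hv ((hmemjs q).mp hm0).2), hcnt,
            if_neg hv, Nat.add_zero, hEmgd q hq]

lemma A_eq (xs : List Int) : total_execution_time xs = pvAsum xs xs.length := by
  have hv : PySem.Dict.values
      ((PySem.List.enumerate xs).foldl
        (fun d p =>
          match d.get? p.2 with
          | none => d.insert p.2 (PySem.Set.ofList [p.1])
          | some s => d.insert p.2 (PySem.Set.add s p.1))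
        PySem.Dict.empty)
      = (PySem.Set.ofList xs).map (pvGs xs) := by
    rw [PySem.Dict.values, ttp_items, List.map_map]
    exact List.map_congr_left fun v _ => rfl
  have H : ∀ j : Nat, j < xs.length →
      (((PySem.Set.ofList xs).map (pvGs xs)).foldl
        (fun d groups => groups.foldl (fun d proc => d.insert proc groups) d)
        PySem.Dict.empty).get? ((j : Nat) : Int) = some (pvGs xs (xs.getD j 0)) := by
    intro j hj
    rw [ptg_outer xs (PySem.Set.ofList xs) PySem.Dict.empty j hj]
    have hmem : xs.getD j 0 ∈ PySem.Set.ofList xs := by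
      rw [PySem.Set.mem_ofList, getD_lt xs j hj]
      exact List.getElem_mem hj
    rw [if_pos hmem]
  have H' : ∀ j : Nat, j < xs.length →
      ((PySem.Dict.values
        ((PySem.List.enumerate xs).foldl
          (fun d p =>
            match d.get? p.2 with
            | none => d.insert p.2 (PySem.Set.ofList [p.1])
            | some s => d.insert p.2 (PySem.Set.add s p.1))
          PySem.Dict.empty)).foldl
        (fun d groups => groups.foldl (fun d proc => d.insert proc groups) d)
        PySem.Dict.empty).get? ((j : Nat) : Int) = some (pvGs xs (xs.getD j 0)) := by
    rw [hv]; exact H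
  have key := loopA xs _ H' xs.length le_rfl
  exact congrArg Prod.fst key


-- ===== VERDICT (by name: the statement is the Claim_ definition above) =====
theorem total_execution_time_spec : Claim_equal_total_execution_time := by
  intro execution _
  unfold Spec_total_execution_time
  rw [A_eq, B_eq, pvAsum_eq execution execution.length le_rfl, List.take_length]
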